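-- pv_equiv track=rewrite | github.com/DevilDeath07/Leet_code_solution | daily_solution/Medium/1726. Tuple with Same Product.py | tupleSameProduct
-- ===== SOURCE A (Python) =====
-- from typing import List
--
-- def tupleSameProduct(nums: List[int]) -> int:
--     n = len(nums)
--     count = 0
--     product_counts = {}  # Store counts of each product
--
--     for i in range(n):
--         for j in range(i + 1, n):  # Avoid duplicates (a,b) and (b,a) initially
--             product = nums[i] * nums[j]
--             product_counts[product] = product_counts.get(product, 0) + 1
--
--     for product, freq in product_counts.items():
--          count += freq * (freq - 1)
--
--     return count * 4
-- ===== SOURCE B (Python) =====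
-- def tupleSameProduct(nums):
--     n = len(nums)
--     products = sorted(nums[i] * nums[j] for i in range(n) for j in range(i + 1, n))
--     total = 0
--     streak = 0
--     prev = None
--     for p in products:
--         if p == prev:
--             streak += 1
--         else:
--             streak = 0
--         total += streak
--         prev = p
--     return total * 8
-- ===== Notes on version B (the rewrite author's own statement) =====
-- stated objective: alternative
-- what changed: B replaces A's hash-map frequency table by sorting the list of pairwise products and counting equal pairs in one linear scan over runs of the sorted list (streak accumulator), returning the pair count times 8.
import Mathlib
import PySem

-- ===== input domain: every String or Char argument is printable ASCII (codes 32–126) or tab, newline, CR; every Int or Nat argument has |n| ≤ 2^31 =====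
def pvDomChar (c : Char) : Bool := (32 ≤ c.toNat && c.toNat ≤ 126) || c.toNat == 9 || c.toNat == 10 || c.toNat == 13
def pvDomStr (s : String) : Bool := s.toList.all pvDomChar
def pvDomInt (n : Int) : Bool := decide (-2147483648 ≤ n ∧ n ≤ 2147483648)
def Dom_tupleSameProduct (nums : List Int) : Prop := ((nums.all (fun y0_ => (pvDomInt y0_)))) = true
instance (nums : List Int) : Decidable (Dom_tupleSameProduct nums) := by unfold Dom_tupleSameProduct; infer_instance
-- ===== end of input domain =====

-- B drops A's hash-map frequency table: it sorts the pairwise products and counts equal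
-- pairs by scanning runs of the sorted list (alternative algorithm, same result).

-- ===== PORT A =====
def tupleSameProduct (nums : List Int) : Int :=
  let n : Int := nums.length
  let product_counts :=
    (PySem.List.pyRange 0 n 1).foldl (fun d i =>
      (PySem.List.pyRange (i + 1) n 1).foldl (fun d j =>
        let product := PySem.List.pyGetD nums i 0 * PySem.List.pyGetD nums j 0
        d.insert product (d.getD product 0 + 1)) d)
      (PySem.Dict.empty : PySem.Dict Int Int)
  let count := product_counts.items.foldl (fun c p => c + p.2 * (p.2 - 1)) 0
  count * 4

-- ===== PORT B =====
-- B-side step of the run scan: state (total, streak, prev)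
def pvStepB (st : Int × Int × Option Int) (p : Int) : Int × Int × Option Int :=
  let streak := if some p == st.2.2 then st.2.1 + 1 else 0
  (st.1 + streak, streak, some p)

def tupleSameProduct_alt (nums : List Int) : Int :=
  let n : Int := nums.length
  let products := PySem.List.sorted
    ((PySem.List.pyRange 0 n 1).flatMap (fun i =>
      (PySem.List.pyRange (i + 1) n 1).map (fun j =>
        PySem.List.pyGetD nums i 0 * PySem.List.pyGetD nums j 0)))
    (fun x => x) false
  let st := products.foldl pvStepB ((0 : Int), (0 : Int), (none : Option Int))
  st.1 * 8

-- ===== PRECONDITION & SPEC =====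
def Spec_tupleSameProduct (nums : List Int) (out : Int) : Prop := out = tupleSameProduct_alt nums
instance (nums : List Int) (out : Int) : Decidable (Spec_tupleSameProduct nums out) := by unfold Spec_tupleSameProduct; infer_instance

-- ===== CLAIM (what is proved, stated in full; the proofs are below) =====
def Claim_equal_tupleSameProduct : Prop := ∀ (nums : List Int), Dom_tupleSameProduct nums → Spec_tupleSameProduct nums (tupleSameProduct nums)

-- ===== LEMMAS AND PROOFS =====

-- A's dict-building step, A's second-pass sum as a function of the dict.
def pvStepA (d : PySem.Dict Int Int) (p : Int) : PySem.Dict Int Int :=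
  d.insert p (d.getD p 0 + 1)

def pvSum (d : PySem.Dict Int Int) : Int :=
  (d.items.map (fun p => p.2 * (p.2 - 1))).sum

-- Σ_{x∈l} count_l(x)  and the pair count  Σ_j #{i<j : l[i]=l[j]}
def pvS (l : List Int) : Int := (l.map (fun x => (l.count x : Int))).sum

def pvE : List Int → Int
  | [] => 0
  | x :: xs => (xs.count x : Int) + pvE xs

-- the flattened product list both ports traverse
def pvProducts (nums : List Int) : List Int :=
  (PySem.List.pyRange 0 nums.length 1).flatMap (fun i =>
    (PySem.List.pyRange (i + 1) nums.length 1).map (fun j =>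
      PySem.List.pyGetD nums i 0 * PySem.List.pyGetD nums j 0))

theorem pvSum_indicator (x : Int) (xs : List Int) :
    (xs.map (fun y => if x = y then (1 : Int) else 0)).sum = (xs.count x : Int) := by
  induction xs with
  | nil => simp
  | cons h t ih =>
    simp only [List.map_cons, List.sum_cons, ih, List.count_cons]
    by_cases hhx : x = h
    · simp [hhx]
      omega
    · simp [hhx, Ne.symm hhx]

theorem pvS_cons (x : Int) (xs : List Int) :
    pvS (x :: xs) = pvS xs + 2 * (xs.count x : Int) + 1 := by
  unfold pvS
  simp only [List.map_cons, List.sum_cons, List.count_cons, beq_iff_eq]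
  push_cast
  have hsplit : (xs.map (fun y => ((xs.count y : Int) + if x = y then (1 : Int) else 0))).sum
      = (xs.map (fun y => (xs.count y : Int))).sum
        + (xs.map (fun y => if x = y then (1 : Int) else 0)).sum := by
    rw [← List.sum_map_add]
  rw [hsplit, pvSum_indicator]
  ring

theorem pvS_perm {l l' : List Int} (h : l.Perm l') : pvS l = pvS l' := by
  unfold pvS
  have hmap : l'.map (fun x => (l'.count x : Int)) = l'.map (fun x => (l.count x : Int)) :=
    List.map_congr_left fun x _ => by rw [h.count_eq]
  rw [hmap]
  exact (h.map _).sum_eq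

theorem pvTwoE (l : List Int) : 2 * pvE l = pvS l - l.length := by
  induction l with
  | nil => simp [pvE, pvS]
  | cons x xs ih =>
    rw [pvE, pvS_cons]
    simp only [List.length_cons]
    push_cast
    omega

-- updating the one item with key p (unique, value v) adds (v+1)v - v(v-1) = 2v to the sum
theorem pvSum_update_list (l : List (Int × Int)) (p v : Int)
    (hnd : (l.map Prod.fst).Nodup) (hmem : (p, v) ∈ l) :
    ((l.map (fun q => if q.1 == p then (p, v + 1) else q)).map (fun q => q.2 * (q.2 - 1))).sum
      = ((l.map (fun q => q.2 * (q.2 - 1))).sum) + 2 * v := by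
  induction l with
  | nil => cases hmem
  | cons hd tl ih =>
    simp only [List.map_cons, List.nodup_cons] at hnd
    simp only [beq_iff_eq] at ih ⊢
    simp only [List.map_cons, List.sum_cons]
    rcases List.mem_cons.mp hmem with heq | hmemtl
    · subst heq
      have hid : tl.map (fun q => if q.1 = p then (p, v + 1) else q) = tl.map id :=
        List.map_congr_left (fun q hq => by
          have : q.1 ≠ p := fun h => hnd.1 (by rw [← h]; exact List.mem_map_of_mem (a := q) hq)
          simp [this])
      rw [if_pos rfl, hid, List.map_id]
      ring
    · have hne : hd.1 ≠ p := fun h => hnd.1 (by rw [h]; exact List.mem_map_of_mem (a := (p, v)) hmemtl)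
      rw [if_neg hne, ih hnd.2 hmemtl]
      ring

theorem pvSum_stepA (d : PySem.Dict Int Int) (p : Int) (hnd : d.keys.Nodup) :
    pvSum (pvStepA d p) = pvSum d + 2 * d.getD p 0 := by
  by_cases hc : d.contains p = true
  · obtain ⟨v, hv⟩ := Option.isSome_iff_exists.mp (PySem.Dict.contains_eq_isSome_get? d p ▸ hc)
    have hmem : (p, v) ∈ d.items := PySem.Dict.mem_items_of_get?_eq_some d hv
    have hgd : d.getD p 0 = v := PySem.Dict.getD_of_get?_eq_some d 0 hv
    unfold pvSum pvStepA
    rw [PySem.Dict.items_insert_of_contains _ _ hc, hgd]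
    exact pvSum_update_list d.items p v (by simpa [PySem.Dict.keys] using hnd) hmem
  · have hc' : d.contains p = false := by simpa using hc
    have hgd : d.getD p 0 = 0 := PySem.Dict.getD_of_not_contains d 0 hc'
    unfold pvSum pvStepA
    rw [PySem.Dict.items_insert_of_not_contains _ _ hc', hgd]
    simp

theorem pvNodup_stepA (d : PySem.Dict Int Int) (p : Int) (hnd : d.keys.Nodup) :
    (pvStepA d p).keys.Nodup := PySem.Dict.nodup_keys_insert d p _ hnd

-- A-side loop invariant: the dict carries the counts of the processed prefix, and the
-- second-pass sum of the final dict is the equal-pair count (doubled) of the whole list.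
theorem pvA_inv : ∀ (ps pref : List Int) (d : PySem.Dict Int Int), d.keys.Nodup →
    (∀ v, d.getD v 0 = (pref.count v : Int)) →
    pvSum (ps.foldl pvStepA d) = pvSum d + pvS (pref ++ ps) - pvS pref - ps.length := by
  intro ps
  induction ps with
  | nil => intro pref d _ _; simp
  | cons x xs ih =>
    intro pref d hnd hcnt
    have hstep : pvSum (pvStepA d x) = pvSum d + 2 * (pref.count x : Int) := by
      rw [pvSum_stepA d x hnd, hcnt]
    have hcnt' : ∀ v, (pvStepA d x).getD v 0 = ((x :: pref).count v : Int) := by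
      intro v
      unfold pvStepA
      rw [PySem.Dict.getD_insert]
      by_cases hvx : v = x
      · subst hvx; rw [if_pos rfl, hcnt, List.count_cons]; simp
      · rw [if_neg hvx, hcnt, List.count_cons]
        simp [Ne.symm hvx]
    have hperm : pvS ((x :: pref) ++ xs) = pvS (pref ++ x :: xs) :=
      pvS_perm (List.perm_middle.symm)
    simp only [List.foldl_cons]
    rw [ih (x :: pref) (pvStepA d x) (pvNodup_stepA d x hnd) hcnt', hstep, hperm,
      pvS_cons]
    simp only [List.length_cons]
    push_cast
    ring

theorem pvA_eq (nums : List Int) :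
    tupleSameProduct nums = (pvS (pvProducts nums) - (pvProducts nums).length) * 4 := by
  have h1 : tupleSameProduct nums =
      pvSum ((pvProducts nums).foldl pvStepA PySem.Dict.empty) * 4 := by
    unfold tupleSameProduct pvProducts
    rw [List.foldl_flatMap]
    simp only [List.foldl_map]
    rw [PySem.List.foldl_add]
    simp [pvSum, pvStepA]
  rw [h1, pvA_inv (pvProducts nums) [] PySem.Dict.empty (by decide)
    (by intro v; simp [PySem.Dict.getD_empty])]
  have hz : pvSum (PySem.Dict.empty : PySem.Dict Int Int) = 0 := rfl
  rw [hz]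
  simp [pvS]

-- B-side scan invariant on a sorted suffix: prev = p with streak s means s+1 copies of p
-- were just seen, so each further p adds its run position to the total.
theorem pvScan_inv : ∀ (l : List Int) (t s p : Int), l.Pairwise (· ≤ ·) →
    (∀ x ∈ l, p ≤ x) →
    (l.foldl pvStepB (t, s, some p)).1 = t + pvE l + (s + 1) * (l.count p : Int) := by
  intro l
  induction l with
  | nil => intro t s p _ _; simp [pvE]
  | cons x xs ih =>
    intro t s p hsort hlb
    have hxs : xs.Pairwise (· ≤ ·) := hsort.of_cons
    have hxall : ∀ y ∈ xs, x ≤ y := fun y hy => List.rel_of_pairwise_cons hsort hy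
    simp only [List.foldl_cons]
    by_cases hxp : x = p
    · subst hxp
      have hstep : pvStepB (t, s, some x) x = (t + (s + 1), s + 1, some x) := by
        simp [pvStepB]
      rw [hstep, ih (t + (s + 1)) (s + 1) x hxs hxall, pvE, List.count_cons]
      simp
      ring
    · have hstep : pvStepB (t, s, some p) x = (t, 0, some x) := by
        simp [pvStepB, hxp]
      have hplt : p < x := lt_of_le_of_ne (hlb x (List.mem_cons_self)) (Ne.symm hxp)
      have hnp : (x :: xs).count p = 0 := by
        rw [List.count_eq_zero]
        intro hmem
        rcases List.mem_cons.mp hmem with h | h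
        · exact hxp h.symm
        · exact absurd (lt_of_lt_of_le hplt (hxall p h)) (lt_irrefl p)
      rw [hstep, ih t 0 x hxs hxall, pvE, hnp]
      ring

theorem pvScan_start (l : List Int) (hsort : l.Pairwise (· ≤ ·)) :
    (l.foldl pvStepB ((0 : Int), (0 : Int), (none : Option Int))).1 = pvE l := by
  cases l with
  | nil => simp [pvE]
  | cons x xs =>
    have hstep : pvStepB ((0 : Int), (0 : Int), (none : Option Int)) x = (0, 0, some x) := by
      simp [pvStepB]
    simp only [List.foldl_cons]
    rw [hstep, pvScan_inv xs 0 0 x hsort.of_cons (fun y hy => List.rel_of_pairwise_cons hsort hy), pvE]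
    ring

theorem pvB_eq (nums : List Int) :
    tupleSameProduct_alt nums =
      pvE (PySem.List.sorted (pvProducts nums) (fun x => x) false) * 8 := by
  have hsort : (PySem.List.sorted (pvProducts nums) (fun x => x) false).Pairwise (· ≤ ·) :=
    PySem.List.sorted_pairwise _ _
  have h : tupleSameProduct_alt nums =
      ((PySem.List.sorted (pvProducts nums) (fun x => x) false).foldl pvStepB
        ((0 : Int), (0 : Int), (none : Option Int))).1 * 8 := rfl
  rw [h, pvScan_start _ hsort]

-- ===== VERDICT (by name: the statement is the Claim_ definition above) =====
theorem tupleSameProduct_spec : Claim_equal_tupleSameProduct := by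
  intro nums _
  unfold Spec_tupleSameProduct
  rw [pvA_eq, pvB_eq]
  have hperm : (PySem.List.sorted (pvProducts nums) (fun x => x) false).Perm (pvProducts nums) :=
    PySem.List.sorted_perm _ _ _
  have h2 := pvTwoE (PySem.List.sorted (pvProducts nums) (fun x => x) false)
  rw [pvS_perm hperm, hperm.length_eq] at h2
  omega
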